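-- pv_equiv track=rewrite | github.com/ravish-oo/opoch-toe-arcagi | src/arcbit/emitters/lattice.py | _build_residue_mask
-- ===== SOURCE A (Python) =====
-- from typing import List, Dict, Tuple, Optional, TypedDict
--
-- def _build_residue_mask(
--     i: int,
--     j: int,
--     p_r: Optional[int],
--     p_c: Optional[int],
--     R_out: int,
--     C_out: int
-- ) -> List[int]:
--     """
--     Build bit mask for residue class (i,j).
--
--     R_{i,j}[r] has bit c set iff:
--       - r mod p_r == i (or p_r is None → all rows match)
--       - c mod p_c == j (or p_c is None → all cols match)
--
--     Spec: WO-09 v1.6 section 2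
--     """
--     R_ij = [0] * R_out
--
--     for r in range(R_out):
--         # Check row residue
--         if p_r is not None and r % p_r != i:
--             continue  # Row doesn't match residue class
--
--         # Build column mask for this row
--         col_mask = 0
--         for c in range(C_out):
--             # Check col residue
--             if p_c is not None and c % p_c != j:
--                 continue  # Col doesn't match residue class
--
--             # This pixel is in residue (i,j)
--             col_mask |= (1 << c)
--
--         R_ij[r] = col_mask
--
--     return R_ij
-- ===== SOURCE B (Python) =====
-- from typing import Optional, List
--
--
-- def _indices(res: int, p: Optional[int], n: int) -> range:
--     """The indices 0 <= x < n in residue class res modulo p (every index if p is None)."""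
--     if p is None:
--         return range(n)
--     if 0 <= res < p:
--         return range(res, n, p)
--     return range(0)  # no index has this residue
--
--
-- def _build_residue_mask(
--     i: int,
--     j: int,
--     p_r: Optional[int],
--     p_c: Optional[int],
--     R_out: int,
--     C_out: int
-- ) -> List[int]:
--     R_ij = [0] * R_out
--     rows = _indices(i, p_r, R_out)
--     if rows:
--         col_mask = 0
--         for c in _indices(j, p_c, C_out):
--             col_mask |= 1 << c
--         for r in rows:
--             R_ij[r] = col_mask
--     return R_ij
-- ===== Notes on version B (the rewrite author's own statement) =====
-- stated objective: faster
-- what changed: B computes the shared column mask once over the stepped range of matching columns and writes it only into the stepped range of matching rows, instead of A's per-row rescan of all C_out columns; Pre_ restricts to the natural domain of positive moduli (A raises ZeroDivisionError for a zero modulus once its loop runs, and its values for negative moduli come from Python's divisor-sign mod, outside the residue-class spec).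
-- outside the precondition, e.g. on _build_residue_mask(-1, 0, -2, None, 3, 2): A returns [0, 3, 0], B returns [0, 0, 0]; on _build_residue_mask(0, 0, 0, None, 3, 2): A raises ZeroDivisionError, B returns [0, 0, 0]
import Mathlib
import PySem

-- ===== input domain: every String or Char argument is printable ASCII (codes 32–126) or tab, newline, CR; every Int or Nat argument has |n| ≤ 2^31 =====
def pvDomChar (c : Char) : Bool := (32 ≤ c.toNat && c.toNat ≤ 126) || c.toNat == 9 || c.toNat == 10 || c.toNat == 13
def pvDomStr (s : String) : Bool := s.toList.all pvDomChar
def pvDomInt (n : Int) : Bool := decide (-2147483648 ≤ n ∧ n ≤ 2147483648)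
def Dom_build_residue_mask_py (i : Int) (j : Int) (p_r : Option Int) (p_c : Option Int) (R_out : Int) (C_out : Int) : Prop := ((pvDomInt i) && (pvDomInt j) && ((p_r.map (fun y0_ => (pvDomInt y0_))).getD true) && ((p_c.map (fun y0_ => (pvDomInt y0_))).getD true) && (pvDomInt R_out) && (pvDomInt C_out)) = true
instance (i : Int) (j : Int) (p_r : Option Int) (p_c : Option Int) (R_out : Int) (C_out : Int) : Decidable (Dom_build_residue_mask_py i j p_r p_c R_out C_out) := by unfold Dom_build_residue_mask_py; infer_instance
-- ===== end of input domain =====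

-- B replaces A's R_out×C_out double scan by one shared column mask over the stepped range of
-- matching columns, written only into the stepped range of matching rows (faster, asymptotically).

-- ===== PORT A =====
-- A's skip test `p is not None and x % p != res`
def pvSkipA (res : Int) (p : Option Int) (x : Int) : Bool :=
  match p with | some q => decide (PySem.Int.mod x q ≠ res) | none => false

-- inner column loop of A: build col_mask for one row (1 << c ported as <<< c.toNat: exact, c ≥ 0 in range(C_out))
def pvColMaskA (j : Int) (p_c : Option Int) (C_out : Int) : Int :=
  (PySem.List.pyRange 0 C_out 1).foldl (fun col_mask c =>
    if pvSkipA j p_c c = true then col_mask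
    else PySem.Int.bor col_mask ((1 : Int) <<< (c.toNat : Nat))) 0

def build_residue_mask_py (i : Int) (j : Int) (p_r : Option Int) (p_c : Option Int) (R_out : Int) (C_out : Int) : List Int :=
  (PySem.List.pyRange 0 R_out 1).foldl (fun R_ij r =>
    if pvSkipA i p_r r = true then R_ij
    else PySem.List.pySetD R_ij r (pvColMaskA j p_c C_out))
    (PySem.List.pyRepeat [(0 : Int)] R_out)

-- ===== PORT B =====
-- B helper `_indices`: the indices 0 ≤ x < n in residue class res modulo p (every index if p is None)
def pvIndices (res : Int) (p : Option Int) (n : Int) : List Int :=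
  match p with
  | none => PySem.List.pyRange 0 n 1
  | some p => if 0 ≤ res ∧ res < p then PySem.List.pyRange res n p else []

def build_residue_mask_py_alt (i : Int) (j : Int) (p_r : Option Int) (p_c : Option Int) (R_out : Int) (C_out : Int) : List Int :=
  let R_ij := PySem.List.pyRepeat [(0 : Int)] R_out
  let rows := pvIndices i p_r R_out
  if rows = [] then R_ij
  else
    let col_mask := (pvIndices j p_c C_out).foldl (fun m c => PySem.Int.bor m ((1 : Int) <<< (c.toNat : Nat))) 0
    rows.foldl (fun R_ij r => PySem.List.pySetD R_ij r col_mask) R_ij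

-- ===== PRECONDITION & SPEC =====
-- Pre_ restricts to the natural domain of positive moduli: for a zero modulus A raises
-- ZeroDivisionError as soon as the corresponding loop runs, and for a negative modulus A's
-- values come from Python's divisor-sign `%`, outside the residue-class spec.
def Pre_build_residue_mask_py (i : Int) (j : Int) (p_r : Option Int) (p_c : Option Int) (R_out : Int) (C_out : Int) : Prop :=
  (∀ q, p_r = some q → 0 < q) ∧ (∀ q, p_c = some q → 0 < q)
instance (i : Int) (j : Int) (p_r : Option Int) (p_c : Option Int) (R_out : Int) (C_out : Int) : Decidable (Pre_build_residue_mask_py i j p_r p_c R_out C_out) := by unfold Pre_build_residue_mask_py; infer_instance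

def pvWitness_build_residue_mask_py : Int × Int × Option Int × Option Int × Int × Int := (1, 0, some 2, some 2, 4, 4)

def Spec_build_residue_mask_py (i : Int) (j : Int) (p_r : Option Int) (p_c : Option Int) (R_out : Int) (C_out : Int) (out : List Int) : Prop := out = build_residue_mask_py_alt i j p_r p_c R_out C_out
instance (i : Int) (j : Int) (p_r : Option Int) (p_c : Option Int) (R_out : Int) (C_out : Int) (out : List Int) : Decidable (Spec_build_residue_mask_py i j p_r p_c R_out C_out out) := by unfold Spec_build_residue_mask_py; infer_instance

-- ===== CLAIM (what is proved, stated in full; the proofs are below) =====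
def Claim_equal_build_residue_mask_py : Prop := ∀ (i : Int) (j : Int) (p_r : Option Int) (p_c : Option Int) (R_out : Int) (C_out : Int), Dom_build_residue_mask_py i j p_r p_c R_out C_out → Pre_build_residue_mask_py i j p_r p_c R_out C_out → Spec_build_residue_mask_py i j p_r p_c R_out C_out (build_residue_mask_py i j p_r p_c R_out C_out)

-- ===== LEMMAS AND PROOFS =====

lemma pv_mod_sub_dvd (x q : Int) : q ∣ x - PySem.Int.mod x q :=
  ⟨PySem.Int.floordiv x q, by have := PySem.Int.floordiv_mul_add_mod x q; linarith [mul_comm (PySem.Int.floordiv x q) q]⟩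

-- Python's `x % q == res` is a congruence, for a positive modulus and a residue in [0, q)
lemma pv_mod_eq_iff {x res q : Int} (hq : 0 < q) (h0 : 0 ≤ res) (h1 : res < q) :
    PySem.Int.mod x q = res ↔ q ∣ x - res := by
  have hself := pv_mod_sub_dvd x q
  have hm0 : 0 ≤ PySem.Int.mod x q := PySem.Int.mod_nonneg x hq
  have hm1 : PySem.Int.mod x q < q := PySem.Int.mod_lt x hq
  constructor
  · rintro rfl; exact hself
  · intro hd
    have hdiff : q ∣ PySem.Int.mod x q - res := by
      have h : PySem.Int.mod x q - res = (x - res) - (x - PySem.Int.mod x q) := by ring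
      rw [h]; exact dvd_sub hd hself
    have := Int.eq_zero_of_abs_lt_dvd hdiff (by rw [abs_lt]; omega)
    omega

lemma pv_pairwise_lt_pyRange_pos {a b s : Int} (hs : 0 < s) :
    (PySem.List.pyRange a b s).Pairwise (· < ·) := by
  rw [PySem.List.pyRange_of_pos a b hs]
  refine List.pairwise_map.mpr ?_
  refine List.pairwise_lt_range.imp ?_
  intro k1 k2 h
  have : (k1 : Int) < (k2 : Int) := by exact_mod_cast h
  nlinarith

-- the core identity: A's filtered full scan IS B's stepped range (positive modulus)
lemma pv_filter_mod {res q : Int} (hq : 0 < q) (n : Int) :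
    (PySem.List.pyRange 0 n 1).filter (fun c => decide (PySem.Int.mod c q = res))
      = pvIndices res (some q) n := by
  by_cases hres : 0 ≤ res ∧ res < q
  · obtain ⟨h0, h1⟩ := hres
    rw [pvIndices, if_pos ⟨h0, h1⟩]
    refine PySem.List.eq_of_perm_of_pairwise_le_of_injective (fun x : Int => x)
      (fun a b h => h) ?_ ?_ ?_
    · refine (List.perm_ext_iff_of_nodup ?_ ?_).mpr ?_
      · exact (PySem.List.nodup_pyRange_one 0 n).filter _
      · exact (pv_pairwise_lt_pyRange_pos hq).imp ne_of_lt
      · intro x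
        rw [List.mem_filter, PySem.List.mem_pyRange_one,
          PySem.List.mem_pyRange_iff_of_pos hq, decide_eq_true_iff,
          pv_mod_eq_iff hq h0 h1]
        constructor
        · rintro ⟨⟨hx0, hxn⟩, hd⟩
          refine ⟨?_, hxn, hd⟩
          by_contra hlt
          rw [not_le] at hlt
          have : x - res = 0 := Int.eq_zero_of_abs_lt_dvd hd (by rw [abs_lt]; omega)
          omega
        · rintro ⟨hrx, hxn, hd⟩
          exact ⟨⟨by omega, hxn⟩, hd⟩
    · exact ((PySem.List.pairwise_lt_pyRange_one 0 n).sublist List.filter_sublist).imp le_of_lt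
    · exact (pv_pairwise_lt_pyRange_pos hq).imp le_of_lt
  · rw [pvIndices, if_neg hres, List.filter_eq_nil_iff]
    intro x hx
    simp only [decide_eq_true_iff]
    intro h
    have := PySem.Int.mod_nonneg x hq
    have := PySem.Int.mod_lt x hq
    omega

-- A's skip-loop as a fold over the filtered list
lemma pv_foldl_skip {α δ : Type} (sk : α → Bool) (f : δ → α → δ) (l : List α) (init : δ) :
    l.foldl (fun acc x => if sk x = true then acc else f acc x) init
      = (l.filter (fun x => !sk x)).foldl f init := by
  have h : (fun (acc : δ) (x : α) => if sk x = true then acc else f acc x)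
      = fun acc x => if (!sk x) = true then f acc x else acc := by
    funext acc x; cases hsk : sk x <;> simp
  rw [h, PySem.List.foldl_if_eq_foldl_filter]

-- A's kept indices = B's stepped indices (the positivity comes from Pre_)
lemma pv_kept_eq_indices (res : Int) (p : Option Int) (n : Int) (hp : ∀ q, p = some q → 0 < q) :
    (PySem.List.pyRange 0 n 1).filter (fun c => !pvSkipA res p c) = pvIndices res p n := by
  cases p with
  | none => simp [pvSkipA, pvIndices]
  | some q =>
      have h : (fun c => !pvSkipA res (some q) c)
          = fun c => decide (PySem.Int.mod c q = res) := by
        funext c; simp [pvSkipA]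
      rw [h]
      exact pv_filter_mod (hp q rfl) n

-- ===== VERDICT (by name: the statement is the Claim_ definition above) =====
theorem build_residue_mask_py_spec : Claim_equal_build_residue_mask_py := by
  intro i j p_r p_c R_out C_out hdom hpre
  obtain ⟨h1, h2⟩ := hpre
  unfold Spec_build_residue_mask_py build_residue_mask_py build_residue_mask_py_alt pvColMaskA
  rw [pv_foldl_skip (sk := pvSkipA i p_r), pv_kept_eq_indices i p_r R_out h1,
    pv_foldl_skip (sk := pvSkipA j p_c), pv_kept_eq_indices j p_c C_out h2]
  by_cases hrows : pvIndices i p_r R_out = []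
  · rw [hrows]; rfl
  · simp only [hrows]; rfl
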